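-- pv_equiv track=rewrite | github.com/icomse/3rd_workshop_advanced_sampling | Thursday/cffs_util.py | loc_edges
-- ===== SOURCE A (Python) =====
-- def loc_edges(sset):
--     # Set object to store edges
--     edges = set()
--     for site in sset:
--         bin_cv1 = site[0]
--         bin_cv2 = site[1]
--         countn = 0
--         if (bin_cv1-1,bin_cv2) in sset:
--             countn+=1
--         if (bin_cv1+1,bin_cv2) in sset:
--             countn+=1
--         if (bin_cv1,bin_cv2-1) in sset:
--             countn+=1
--         if (bin_cv1,bin_cv2+1) in sset:
--             countn+=1
--         # If countn < 4 we have found an edge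
--         if countn < 4:
--             edges.add(site)
--
--     return edges
-- ===== SOURCE B (Python) =====
-- def loc_edges(sset):
--     pts = set(sset)
--     # Scatter pass: count[c] = number of present sites adjacent to c
--     # (the neighbor relation is symmetric, so incrementing at each
--     # neighbor of every present site yields the neighbor count of c).
--     count = {}
--     for x, y in pts:
--         for n in ((x - 1, y), (x + 1, y), (x, y - 1), (x, y + 1)):
--             count[n] = count.get(n, 0) + 1
--     return {s for s in pts if count.get(s, 0) < 4}
-- ===== Notes on version B (the rewrite author's own statement) =====
-- stated objective: faster
-- what changed: Replaces the per-site scan of sset for each of the four neighbors (list membership is O(n)) by one scatter pass that builds a neighbor-count dictionary, then filters the sites whose count is below 4.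
import Mathlib
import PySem

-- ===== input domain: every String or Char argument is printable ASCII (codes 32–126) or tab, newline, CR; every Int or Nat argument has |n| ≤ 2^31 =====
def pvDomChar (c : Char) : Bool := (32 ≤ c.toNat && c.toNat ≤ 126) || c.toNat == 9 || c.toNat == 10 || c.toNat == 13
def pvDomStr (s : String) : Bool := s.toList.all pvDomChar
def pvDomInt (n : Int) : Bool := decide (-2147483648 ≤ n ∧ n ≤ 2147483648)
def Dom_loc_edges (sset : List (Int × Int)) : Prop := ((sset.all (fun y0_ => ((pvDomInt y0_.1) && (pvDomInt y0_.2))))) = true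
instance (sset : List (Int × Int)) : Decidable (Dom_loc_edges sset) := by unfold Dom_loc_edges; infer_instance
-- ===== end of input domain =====

-- B replaces A's per-site membership scans by one scatter pass building a
-- neighbor-count dictionary, then filters sites with count < 4 (O(n) passes instead of O(n) membership scans per site).

-- ===== PORT A =====
def loc_edges (sset : List (Int × Int)) : List (Int × Int) :=
  sset.foldl (fun edges site =>
    let bin_cv1 := site.1
    let bin_cv2 := site.2
    let countn : Int := 0
    let countn := if sset.contains (bin_cv1 - 1, bin_cv2) then countn + 1 else countn
    let countn := if sset.contains (bin_cv1 + 1, bin_cv2) then countn + 1 else countn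
    let countn := if sset.contains (bin_cv1, bin_cv2 - 1) then countn + 1 else countn
    let countn := if sset.contains (bin_cv1, bin_cv2 + 1) then countn + 1 else countn
    if countn < 4 then PySem.Set.add edges site else edges)
    PySem.Set.empty

-- ===== PORT B =====
def pvNbrs (p : Int × Int) : List (Int × Int) :=
  [(p.1 - 1, p.2), (p.1 + 1, p.2), (p.1, p.2 - 1), (p.1, p.2 + 1)]

def loc_edges_alt (sset : List (Int × Int)) : List (Int × Int) :=
  let pts := PySem.Set.ofList sset
  let count : PySem.Dict (Int × Int) Int :=
    pts.foldl (fun d p => (pvNbrs p).foldl (fun d n => d.modify n 0 (· + 1)) d) PySem.Dict.empty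
  pts.filter (fun s => decide (count.getD s 0 < 4))

-- ===== PRECONDITION & SPEC =====
def Spec_loc_edges (sset : List (Int × Int)) (out : List (Int × Int)) : Prop := out = loc_edges_alt sset
instance (sset : List (Int × Int)) (out : List (Int × Int)) : Decidable (Spec_loc_edges sset out) := by unfold Spec_loc_edges; infer_instance

-- ===== CLAIM (what is proved, stated in full; the proofs are below) =====
def Claim_equal_loc_edges : Prop := ∀ (sset : List (Int × Int)), Dom_loc_edges sset → Spec_loc_edges sset (loc_edges sset)

-- ===== LEMMAS AND PROOFS =====

-- A's let-chain neighbor count for one site (definitional copy of the loop body).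
def pvCntA (sset : List (Int × Int)) (site : Int × Int) : Int :=
  let bin_cv1 := site.1
  let bin_cv2 := site.2
  let countn : Int := 0
  let countn := if sset.contains (bin_cv1 - 1, bin_cv2) then countn + 1 else countn
  let countn := if sset.contains (bin_cv1 + 1, bin_cv2) then countn + 1 else countn
  let countn := if sset.contains (bin_cv1, bin_cv2 - 1) then countn + 1 else countn
  if sset.contains (bin_cv1, bin_cv2 + 1) then countn + 1 else countn

-- B's scatter dictionary (definitional copy of B's let).
def pvCountD (sset : List (Int × Int)) : PySem.Dict (Int × Int) Int :=
  (PySem.Set.ofList sset).foldl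
    (fun d p => (pvNbrs p).foldl (fun d n => d.modify n 0 (· + 1)) d) PySem.Dict.empty

lemma loc_edges_eq_foldl (sset : List (Int × Int)) :
    loc_edges sset =
      sset.foldl (fun e s => if pvCntA sset s < 4 then PySem.Set.add e s else e) [] := rfl

lemma loc_edges_alt_eq (sset : List (Int × Int)) :
    loc_edges_alt sset =
      (PySem.Set.ofList sset).filter (fun s => decide ((pvCountD sset).getD s 0 < 4)) := rfl

lemma nodup_pvNbrs (p : Int × Int) : (pvNbrs p).Nodup := by
  simp [pvNbrs, Prod.ext_iff]; omega

lemma mem_pvNbrs_comm (p q : Int × Int) : p ∈ pvNbrs q ↔ q ∈ pvNbrs p := by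
  simp [pvNbrs, Prod.ext_iff]; omega

lemma foldl_ite_add (P : (Int × Int) → Prop) [DecidablePred P] :
    ∀ (l : List (Int × Int)) (acc : PySem.Set (Int × Int)),
      l.foldl (fun e s => if P s then PySem.Set.add e s else e) acc
        = (l.filter (fun s => decide (P s))).foldl PySem.Set.add acc := by
  intro l
  induction l with
  | nil => intro acc; rfl
  | cons x xs ih =>
    intro acc
    by_cases h : P x <;> simp [h, ih]

lemma filter_add_pos (p : (Int × Int) → Bool) (acc : PySem.Set (Int × Int)) (x : Int × Int)
    (hp : p x = true) :
    (PySem.Set.add acc x).filter p = PySem.Set.add (acc.filter p) x := by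
  by_cases hc : x ∈ acc <;>
    simp [PySem.Set.add, PySem.Set.contains, List.mem_filter, hc, hp, List.filter_append]

lemma filter_add_neg (p : (Int × Int) → Bool) (acc : PySem.Set (Int × Int)) (x : Int × Int)
    (hp : p x = false) :
    (PySem.Set.add acc x).filter p = acc.filter p := by
  by_cases hc : x ∈ acc <;>
    simp [PySem.Set.add, PySem.Set.contains, hc, hp, List.filter_append]

lemma foldl_add_filter (p : (Int × Int) → Bool) :
    ∀ (l : List (Int × Int)) (acc : PySem.Set (Int × Int)),
      (l.filter p).foldl PySem.Set.add (acc.filter p)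
        = (l.foldl PySem.Set.add acc).filter p := by
  intro l
  induction l with
  | nil => intro acc; rfl
  | cons x xs ih =>
    intro acc
    by_cases hp : p x
    · calc ((x :: xs).filter p).foldl PySem.Set.add (acc.filter p)
          = (xs.filter p).foldl PySem.Set.add (PySem.Set.add (acc.filter p) x) := by
            simp [hp]
        _ = (xs.filter p).foldl PySem.Set.add ((PySem.Set.add acc x).filter p) := by
            rw [filter_add_pos p acc x hp]
        _ = ((x :: xs).foldl PySem.Set.add acc).filter p := by
            rw [List.foldl_cons, ih]
    · have hp' : p x = false := by simpa using hp
      calc ((x :: xs).filter p).foldl PySem.Set.add (acc.filter p)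
          = (xs.filter p).foldl PySem.Set.add (acc.filter p) := by
            simp [hp']
        _ = (xs.filter p).foldl PySem.Set.add ((PySem.Set.add acc x).filter p) := by
            rw [filter_add_neg p acc x hp']
        _ = ((x :: xs).foldl PySem.Set.add acc).filter p := by
            rw [List.foldl_cons, ih]

lemma ofList_filter (p : (Int × Int) → Bool) (l : List (Int × Int)) :
    PySem.Set.ofList (l.filter p) = (PySem.Set.ofList l).filter p := by
  have h := foldl_add_filter p l []
  simpa [PySem.Set.ofList_eq_foldl] using h

lemma pvCountD_eq_counter (sset : List (Int × Int)) :
    pvCountD sset = PySem.Dict.counter ((PySem.Set.ofList sset).flatMap pvNbrs) := by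
  rw [PySem.Dict.counter_eq_foldl, List.foldl_flatMap]
  rfl

lemma count_pvNbrs (p s : Int × Int) :
    (pvNbrs p).count s = if p ∈ pvNbrs s then 1 else 0 := by
  by_cases h : p ∈ pvNbrs s
  · rw [if_pos h]
    exact List.count_eq_one_of_mem (nodup_pvNbrs p) ((mem_pvNbrs_comm s p).mpr h)
  · rw [if_neg h]
    exact List.count_eq_zero.mpr (fun hs => h ((mem_pvNbrs_comm s p).mp hs))

lemma count_flatMap_nbrs (l : List (Int × Int)) (s : Int × Int) :
    (l.flatMap pvNbrs).count s = l.countP (fun p => decide (p ∈ pvNbrs s)) := by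
  rw [List.count_flatMap]
  rw [show (List.count s ∘ pvNbrs)
        = fun p => if (fun p => decide (p ∈ pvNbrs s)) p then 1 else 0 from
      funext fun p => by simp [count_pvNbrs]]
  exact PySem.List.sum_map_ite_one_zero_nat _ l

lemma countP_mem_cons (l : List (Int × Int)) (a : Int × Int) (m : List (Int × Int))
    (ha : a ∉ m) :
    l.countP (fun p => decide (p ∈ a :: m))
      = l.count a + l.countP (fun p => decide (p ∈ m)) := by
  induction l with
  | nil => simp
  | cons x xs ih =>
    rw [List.countP_cons, List.countP_cons, List.count_cons, ih]
    by_cases hx : x = a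
    · subst hx; simp [ha]; omega
    · by_cases hm : x ∈ m <;> (simp [hx, hm, List.mem_cons]; try omega)

lemma count_of_nodup (l : List (Int × Int)) (hl : l.Nodup) (a : Int × Int) :
    l.count a = if a ∈ l then 1 else 0 := by
  by_cases h : a ∈ l
  · rw [if_pos h]; exact List.count_eq_one_of_mem hl h
  · rw [if_neg h]; exact List.count_eq_zero.mpr h

lemma countP_nbrs_of_nodup (l : List (Int × Int)) (hl : l.Nodup) (s : Int × Int) :
    l.countP (fun p => decide (p ∈ pvNbrs s))
      = (if (s.1 - 1, s.2) ∈ l then 1 else 0) + (if (s.1 + 1, s.2) ∈ l then 1 else 0)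
        + (if (s.1, s.2 - 1) ∈ l then 1 else 0) + (if (s.1, s.2 + 1) ∈ l then 1 else 0) := by
  show l.countP (fun p => decide (p ∈ ((s.1 - 1, s.2) :: [(s.1 + 1, s.2), (s.1, s.2 - 1), (s.1, s.2 + 1)]))) = _
  rw [countP_mem_cons l _ _ (by simp [Prod.ext_iff]; try omega)]
  rw [countP_mem_cons l _ _ (by simp [Prod.ext_iff]; try omega)]
  rw [countP_mem_cons l _ _ (by simp [Prod.ext_iff]; try omega)]
  rw [countP_mem_cons l _ [] (by simp)]
  simp [count_of_nodup l hl]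
  omega

lemma getD_pvCountD (sset : List (Int × Int)) (s : Int × Int) :
    (pvCountD sset).getD s 0 = pvCntA sset s := by
  rw [pvCountD_eq_counter, PySem.Dict.getD_counter, count_flatMap_nbrs,
    countP_nbrs_of_nodup _ (PySem.Set.nodup_ofList sset) s]
  simp only [pvCntA, List.contains_iff_mem, PySem.Set.mem_ofList]
  split_ifs <;> try norm_num

-- ===== VERDICT (by name: the statement is the Claim_ definition above) =====
theorem loc_edges_spec : Claim_equal_loc_edges := by
  intro sset _
  unfold Spec_loc_edges
  rw [loc_edges_eq_foldl, loc_edges_alt_eq,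
    foldl_ite_add (fun s => pvCntA sset s < 4) sset [],
    show ((sset.filter (fun s => decide (pvCntA sset s < 4))).foldl PySem.Set.add []
        = PySem.Set.ofList (sset.filter (fun s => decide (pvCntA sset s < 4)))) from
      (PySem.Set.ofList_eq_foldl _).symm,
    ofList_filter]
  exact List.filter_congr (fun s _ => by rw [getD_pvCountD])
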